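-- pv_equiv track=rewrite | github.com/OthmanB/ajAlm_2024 | programs/convert_fit2prior_table/dopriors.py | find_occurrence_index
-- ===== SOURCE A (Python) =====
-- def find_occurrence_index(param_list, string_to_find):
--     index = -1
--     for i, param_name in enumerate(param_list):
--         if param_name == string_to_find:
--             if index != -1:
--                 raise ValueError(f"Multiple occurrences of {string_to_find} found in param_names")
--             index = i
--     if index == -1:
--         raise ValueError(f"{string_to_find} not found in param_names")
--     return index
-- ===== SOURCE B (Python) =====
-- def find_occurrence_index(param_list, string_to_find):
--     indices = [i for i, p in enumerate(param_list) if p == string_to_find]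
--     if not indices:
--         raise ValueError(f"{string_to_find} not found in param_names")
--     if len(indices) > 1:
--         raise ValueError(f"Multiple occurrences of {string_to_find} found in param_names")
--     return indices[0]
-- ===== Notes on version B (the rewrite author's own statement) =====
-- stated objective: alternative
-- what changed: Replaces the single-accumulator scan with an inline duplicate check by gathering all matching indices first and branching on their count; exception messages kept verbatim.
import Mathlib
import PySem

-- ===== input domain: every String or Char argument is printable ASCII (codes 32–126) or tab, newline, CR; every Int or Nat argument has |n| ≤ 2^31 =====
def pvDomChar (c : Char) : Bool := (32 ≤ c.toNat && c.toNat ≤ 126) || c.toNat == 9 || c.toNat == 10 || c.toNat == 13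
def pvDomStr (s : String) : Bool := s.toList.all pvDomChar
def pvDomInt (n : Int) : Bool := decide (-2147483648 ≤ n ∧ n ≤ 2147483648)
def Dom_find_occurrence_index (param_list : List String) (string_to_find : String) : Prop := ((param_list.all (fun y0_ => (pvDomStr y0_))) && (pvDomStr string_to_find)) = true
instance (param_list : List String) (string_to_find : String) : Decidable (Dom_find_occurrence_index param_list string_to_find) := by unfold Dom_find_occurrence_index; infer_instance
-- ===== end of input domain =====

-- B replaces A's single-accumulator scan with inline duplicate check by gathering all
-- matching indices first and branching on their count (alternative decomposition, same cost).

-- ===== PORT A =====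
-- A's for-loop over enumerate with the accumulator `index`; `none` marks the in-loop
-- ValueError for a second occurrence (those inputs are outside Pre_).
def pvALoop (l : List (Int × String)) (s : String) (index : Int) : Option Int :=
  match l with
  | [] => some index
  | (i, p) :: rest =>
      if p == s then
        if index != -1 then none else pvALoop rest s i
      else pvALoop rest s index

def find_occurrence_index (param_list : List String) (string_to_find : String) : Int :=
  match pvALoop (PySem.List.enumerate param_list) string_to_find (-1) with
  | none => 0                                -- raise "Multiple occurrences …" (excluded by Pre_)
  | some index => if index == -1 then 0 else index   -- 0 = raise "… not found" (excluded by Pre_)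

-- ===== PORT B =====
def find_occurrence_index_alt (param_list : List String) (string_to_find : String) : Int :=
  let indices := (PySem.List.enumerate param_list).filterMap
    (fun ip => if ip.2 == string_to_find then some ip.1 else none)
  if indices.isEmpty then 0                  -- raise "… not found" (excluded by Pre_)
  else if indices.length > 1 then 0          -- raise "Multiple occurrences …" (excluded by Pre_)
  else indices.headD 0

-- ===== PRECONDITION & SPEC =====
-- A raises ValueError when string_to_find occurs zero times or more than once; Pre_
-- admits exactly the inputs with a unique occurrence, on which A returns normally.
def Pre_find_occurrence_index (param_list : List String) (string_to_find : String) : Prop :=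
  param_list.count string_to_find = 1
instance (param_list : List String) (string_to_find : String) : Decidable (Pre_find_occurrence_index param_list string_to_find) := by unfold Pre_find_occurrence_index; infer_instance

def pvWitness_find_occurrence_index : List String × String := (["a", "b", "c"], "b")

def Spec_find_occurrence_index (param_list : List String) (string_to_find : String) (out : Int) : Prop := out = find_occurrence_index_alt param_list string_to_find
instance (param_list : List String) (string_to_find : String) (out : Int) : Decidable (Spec_find_occurrence_index param_list string_to_find out) := by unfold Spec_find_occurrence_index; infer_instance

-- ===== CLAIM (what is proved, stated in full; the proofs are below) =====
def Claim_equal_find_occurrence_index : Prop := ∀ (param_list : List String) (string_to_find : String), Dom_find_occurrence_index param_list string_to_find → Pre_find_occurrence_index param_list string_to_find → Spec_find_occurrence_index param_list string_to_find (find_occurrence_index param_list string_to_find)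

-- ===== LEMMAS AND PROOFS =====

-- Once the accumulator is a non-(-1) value, A's loop returns it iff no further match occurs.
lemma pvALoop_pos (l : List (Int × String)) (s : String) (j : Int) (hj : j ≠ -1) :
    pvALoop l s j =
      if (l.filterMap (fun ip => if ip.2 = s then some ip.1 else none)).isEmpty
      then some j else none := by
  induction l with
  | nil => simp [pvALoop]
  | cons hd tl ih =>
      obtain ⟨i, p⟩ := hd
      by_cases hp : p = s
      · simp [pvALoop, List.filterMap_cons, hp, hj]
      · have h1 : pvALoop ((i, p) :: tl) s j = pvALoop tl s j := by
          simp [pvALoop, hp]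
        have h2 : List.filterMap (fun ip => if ip.2 = s then some ip.1 else none) ((i, p) :: tl)
            = List.filterMap (fun ip => if ip.2 = s then some ip.1 else none) tl := by
          rw [List.filterMap_cons]
          simp [hp]
        rw [h1, h2, ih]

-- Starting from -1, A's loop is classified by the list of matching indices, provided all
-- candidate indices are ≥ 0 (true for enumerate from 0).
lemma pvALoop_neg (l : List (Int × String)) (s : String) (hnn : ∀ p ∈ l, 0 ≤ p.1) :
    pvALoop l s (-1) =
      match l.filterMap (fun ip => if ip.2 = s then some ip.1 else none) with
      | [] => some (-1)
      | [i] => some i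
      | _ :: _ :: _ => none := by
  induction l with
  | nil => simp [pvALoop]
  | cons hd tl ih =>
      obtain ⟨i, p⟩ := hd
      have hi : (0:Int) ≤ i := hnn (i, p) (by simp)
      have htl : ∀ p ∈ tl, 0 ≤ p.1 := fun q hq => hnn q (by simp [hq])
      by_cases hp : p = s
      · have hine : i ≠ -1 := by omega
        have h1 : pvALoop ((i, p) :: tl) s (-1) = pvALoop tl s i := by
          simp [pvALoop, hp]
        rw [h1, pvALoop_pos tl s i hine]
        simp only [List.filterMap_cons, hp, if_pos rfl]
        cases h : tl.filterMap (fun ip => if ip.2 = s then some ip.1 else none) with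
        | nil => simp [h]
        | cons a b => simp
      · have h1 : pvALoop ((i, p) :: tl) s (-1) = pvALoop tl s (-1) := by
          simp [pvALoop, hp]
        have h2 : List.filterMap (fun ip => if ip.2 = s then some ip.1 else none) ((i, p) :: tl)
            = List.filterMap (fun ip => if ip.2 = s then some ip.1 else none) tl := by
          rw [List.filterMap_cons]
          simp [hp]
        rw [h1, h2, ih htl]

-- The number of gathered indices equals the count of the string, for any enumerate start.
lemma filterMap_enumerate_length (l : List String) (s : String) (n : Int) :
    ((PySem.List.enumerate l n).filterMap
      (fun ip => if ip.2 = s then some ip.1 else none)).length = l.count s := by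
  induction l generalizing n with
  | nil => simp [PySem.List.enumerate_nil]
  | cons hd tl ih =>
      by_cases hp : hd = s <;>
        simp [PySem.List.enumerate_cons, hp, ih]

theorem find_occurrence_index_spec : Claim_equal_find_occurrence_index := by
  intro pl s _ hpre
  unfold Spec_find_occurrence_index
  have hlen : ((PySem.List.enumerate pl 0).filterMap
      (fun ip => if ip.2 = s then some ip.1 else none)).length = 1 := by
    rw [filterMap_enumerate_length]; exact hpre
  obtain ⟨i, hi⟩ := List.length_eq_one_iff.mp hlen
  have hnn : ∀ p ∈ PySem.List.enumerate pl 0, 0 ≤ p.1 := by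
    intro p hp
    obtain ⟨k, hk, rfl⟩ := (PySem.List.mem_enumerate_iff _ _ _).mp hp
    simp
  have hi0 : (0:Int) ≤ i := by
    have hm : i ∈ (PySem.List.enumerate pl 0).filterMap
        (fun ip => if ip.2 = s then some ip.1 else none) := by rw [hi]; simp
    obtain ⟨ip, hmem, hip⟩ := List.mem_filterMap.mp hm
    have := hnn ip hmem
    by_cases h : ip.2 = s
    · simp [h] at hip; omega
    · simp [h] at hip
  have hbe : (fun (ip : Int × String) => if (ip.2 == s) = true then some ip.1 else none)
      = (fun ip => if ip.2 = s then some ip.1 else none) := by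
    funext ip; simp
  unfold find_occurrence_index find_occurrence_index_alt
  simp only [hbe]
  rw [pvALoop_neg _ _ hnn, hi]
  simp
  omega
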